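-- pv_equiv track=rewrite | github.com/Wissben/hackupc-2019 | backend/app.py | get_printing_specifications
-- ===== SOURCE A (Python) =====
-- def check_color(entity):
--     if entity['entity'] == "color":
--         return entity['value']
--     return None
--
-- def check_size(entity):
--     if entity['entity'] == "size":
--         return entity['value']
--     return None
--
-- def check_object_name(entity):
--     if entity['entity'] == "object":
--         return entity['value']
--     return None
--
-- def get_printing_specifications(entities):
--     color, found_c = None, False
--     size, found_s = None, False
--     name, found_n = None, False
--     for entity in entities:
--         if not found_c:
--             color = check_color(entity)
--             if color is not None:
--                 found_c = True
--
--         if not found_s: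
--             size = check_size(entity)
--             if size is not None:
--                 found_s = True
--
--         if not found_n:
--             name = check_object_name(entity)
--             if name is not None:
--                 found_n = True
--
--         if found_c and found_n and found_s:
--             return color, size, name
--
--     return color, size, name
-- ===== SOURCE B (Python) =====
-- def get_printing_specifications(entities):
--     def first(kind):
--         return next((e['value'] for e in entities if e['entity'] == kind), None)
--     return first('color'), first('size'), first('object')
-- ===== Notes on version B (the rewrite author's own statement) =====
-- stated objective: idiomatic
-- what changed: Replaces the flag-driven interleaved single loop (six pieces of mutable state, early return) with three independent first-match filtered scans via next(...) with a None default.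
import Mathlib
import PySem

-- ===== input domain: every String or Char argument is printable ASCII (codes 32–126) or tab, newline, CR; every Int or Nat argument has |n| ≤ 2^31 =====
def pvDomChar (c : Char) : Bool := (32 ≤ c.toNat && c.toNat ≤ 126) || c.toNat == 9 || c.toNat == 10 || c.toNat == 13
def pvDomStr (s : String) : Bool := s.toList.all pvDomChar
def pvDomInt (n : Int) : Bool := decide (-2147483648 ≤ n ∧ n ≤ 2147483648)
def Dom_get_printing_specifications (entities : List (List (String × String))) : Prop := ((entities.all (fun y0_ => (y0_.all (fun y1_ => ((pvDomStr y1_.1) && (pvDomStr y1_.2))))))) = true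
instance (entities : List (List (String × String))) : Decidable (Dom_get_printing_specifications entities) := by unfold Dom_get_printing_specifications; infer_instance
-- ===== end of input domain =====

-- B replaces A's flag-driven interleaved single loop with three independent
-- first-match filtered scans (one per entity kind); same cost, more idiomatic.

-- first-match association-list lookup = Python dict access d[k] (none = KeyError)
def dget : List (String × String) → String → Option String
  | [], _ => none
  | (k, v) :: rest, key => if k == key then some v else dget rest key

-- ===== PORT A =====
def check_color (entity : List (String × String)) : Option String :=
  if dget entity "entity" = some "color" then dget entity "value" else none

def check_size (entity : List (String × String)) : Option String :=
  if dget entity "entity" = some "size" then dget entity "value" else none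

def check_object_name (entity : List (String × String)) : Option String :=
  if dget entity "entity" = some "object" then dget entity "value" else none

def gpsLoop : List (List (String × String)) → Option String → Bool → Option String → Bool → Option String → Bool → Option String × Option String × Option String
  | [], color, _, size, _, name, _ => (color, size, name)
  | entity :: rest, color, found_c, size, found_s, name, found_n =>
    let (color, found_c) :=
      if found_c then (color, found_c) else (check_color entity, (check_color entity).isSome)
    let (size, found_s) :=
      if found_s then (size, found_s) else (check_size entity, (check_size entity).isSome)
    let (name, found_n) :=
      if found_n then (name, found_n) else (check_object_name entity, (check_object_name entity).isSome)
    if found_c && found_s && found_n then (color, size, name)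
    else gpsLoop rest color found_c size found_s name found_n

def get_printing_specifications (entities : List (List (String × String))) : Option String × Option String × Option String :=
  gpsLoop entities none false none false none false

-- ===== PORT B =====
-- next((e['value'] for e in entities if e['entity'] == kind), None)
def firstValue : List (List (String × String)) → String → Option String
  | [], _ => none
  | e :: rest, kind =>
    if dget e "entity" = some kind then dget e "value" else firstValue rest kind

def get_printing_specifications_alt (entities : List (List (String × String))) : Option String × Option String × Option String :=
  (firstValue entities "color", firstValue entities "size", firstValue entities "object")

-- ===== PRECONDITION & SPEC =====
-- Pre_ excludes inputs where A raises KeyError: an entity without an 'entity'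
-- key, or a color/size/object entity without a 'value' key (B raises there too).
def entityOk (e : List (String × String)) : Bool :=
  match List.lookup "entity" e with
  | none => false
  | some k =>
    if k == "color" || k == "size" || k == "object" then (List.lookup "value" e).isSome else true

def Pre_get_printing_specifications (entities : List (List (String × String))) : Prop :=
  entities.all entityOk = true

instance (entities : List (List (String × String))) : Decidable (Pre_get_printing_specifications entities) := by
  unfold Pre_get_printing_specifications; infer_instance

def pvWitness_get_printing_specifications : (List (List (String × String))) :=
  [[("entity", "color"), ("value", "red")], [("entity", "object"), ("value", "cube")]]

def Spec_get_printing_specifications (entities : List (List (String × String))) (out : Option String × Option String × Option String) : Prop := out = get_printing_specifications_alt entities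
instance (entities : List (List (String × String))) (out : Option String × Option String × Option String) : Decidable (Spec_get_printing_specifications entities out) := by unfold Spec_get_printing_specifications; infer_instance

-- ===== CLAIM (what is proved, stated in full; the proofs are below) =====
def Claim_equal_get_printing_specifications : Prop := ∀ (entities : List (List (String × String))), Dom_get_printing_specifications entities → Pre_get_printing_specifications entities → Spec_get_printing_specifications entities (get_printing_specifications entities)

-- ===== LEMMAS AND PROOFS =====

theorem dget_eq_lookup (e : List (String × String)) (k : String) :
    dget e k = List.lookup k e := by
  induction e with
  | nil => rfl
  | cons p rest ih => cases p with
    | mk a b =>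
      simp only [dget, List.lookup, ih, BEq.comm (a := a)]
      cases h : (k == a) <;> simp [h]

theorem gpsLoop_eq (entities : List (List (String × String))) :
    ∀ (c s n : Option String), entities.all entityOk = true →
      gpsLoop entities c c.isSome s s.isSome n n.isSome =
        (c.or (firstValue entities "color"), s.or (firstValue entities "size"),
          n.or (firstValue entities "object")) := by
  induction entities with
  | nil => intro c s n _; simp [gpsLoop, firstValue]
  | cons e rest ih =>
    intro c s n hok
    simp only [List.all_cons, Bool.and_eq_true] at hok
    obtain ⟨he, hrest⟩ := hok
    have hval : ∀ k, (k == "color" || k == "size" || k == "object") = true →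
        dget e "entity" = some k → (dget e "value").isSome = true := by
      intro k hk hk'
      unfold entityOk at he
      rw [dget_eq_lookup] at hk'
      rw [hk'] at he
      simpa [hk, ← dget_eq_lookup] using he
    -- bridges: updating one slot with this entity's check commutes with the
    -- corresponding first-match scan
    have bc : (if c.isSome then c else check_color e).or (firstValue rest "color") =
        c.or (firstValue (e :: rest) "color") := by
      cases c with
      | some v => simp
      | none =>
        by_cases hm : dget e "entity" = some "color"
        · obtain ⟨w, hw⟩ := Option.isSome_iff_exists.mp (hval "color" (by decide) hm)
          simp [check_color, firstValue, hm, hw]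
        · simp [check_color, firstValue, hm]
    have bs : (if s.isSome then s else check_size e).or (firstValue rest "size") =
        s.or (firstValue (e :: rest) "size") := by
      cases s with
      | some v => simp
      | none =>
        by_cases hm : dget e "entity" = some "size"
        · obtain ⟨w, hw⟩ := Option.isSome_iff_exists.mp (hval "size" (by decide) hm)
          simp [check_size, firstValue, hm, hw]
        · simp [check_size, firstValue, hm]
    have bn : (if n.isSome then n else check_object_name e).or (firstValue rest "object") =
        n.or (firstValue (e :: rest) "object") := by
      cases n with
      | some v => simp
      | none =>
        by_cases hm : dget e "entity" = some "object"
        · obtain ⟨w, hw⟩ := Option.isSome_iff_exists.mp (hval "object" (by decide) hm)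
          simp [check_object_name, firstValue, hm, hw]
        · simp [check_object_name, firstValue, hm]
    have hfc : (if c.isSome then (c, c.isSome) else (check_color e, (check_color e).isSome)) =
        (if c.isSome then c else check_color e, (if c.isSome then c else check_color e).isSome) := by
      cases c <;> simp
    have hfs : (if s.isSome then (s, s.isSome) else (check_size e, (check_size e).isSome)) =
        (if s.isSome then s else check_size e, (if s.isSome then s else check_size e).isSome) := by
      cases s <;> simp
    have hfn : (if n.isSome then (n, n.isSome) else (check_object_name e, (check_object_name e).isSome)) =
        (if n.isSome then n else check_object_name e, (if n.isSome then n else check_object_name e).isSome) := by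
      cases n <;> simp
    unfold gpsLoop
    simp only
    rw [hfc, hfs, hfn]
    by_cases hall : ((if c.isSome then c else check_color e).isSome &&
        (if s.isSome then s else check_size e).isSome &&
        (if n.isSome then n else check_object_name e).isSome) = true
    · rw [if_pos hall, ← bc, ← bs, ← bn]
      simp only [Bool.and_eq_true] at hall
      obtain ⟨⟨h1, h2⟩, h3⟩ := hall
      obtain ⟨v1, hv1⟩ := Option.isSome_iff_exists.mp h1
      obtain ⟨v2, hv2⟩ := Option.isSome_iff_exists.mp h2
      obtain ⟨v3, hv3⟩ := Option.isSome_iff_exists.mp h3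
      rw [hv1, hv2, hv3]
      simp
    · rw [if_neg hall,
        ih (if c.isSome then c else check_color e) (if s.isSome then s else check_size e)
          (if n.isSome then n else check_object_name e) hrest, bc, bs, bn]

-- ===== VERDICT (by name: the statement is the Claim_ definition above) =====
theorem get_printing_specifications_spec : Claim_equal_get_printing_specifications := by
  intro entities _ hpre
  unfold Spec_get_printing_specifications get_printing_specifications get_printing_specifications_alt
  have h := gpsLoop_eq entities none none none hpre
  simpa [Option.or] using h
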